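-- pv_equiv track=rewrite | github.com/soysilver/metaCPS-Server-Module | compressorServer/multiComb.py | find_min_combination
-- ===== SOURCE A (Python) =====
-- def find_min_combination(valid_combinations):
--
--
--
--     if not valid_combinations:
--         return None
--     sorted_combinations = sorted(valid_combinations, key=lambda item: sum(subitem[1] for subitem in item))
--
--     min_combination = sorted_combinations[0]
--     _index = len(sorted_combinations) // 2
--     mid_combination = sorted_combinations[_index ]
--     #max_combination = max(valid_combinations, key=lambda item: sum(subitem[1] for subitem in item))
--     #min_combination = min(valid_combinations, key=lambda item: sum(subitem[1] for subitem in item))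
--     return min_combination, mid_combination
-- ===== SOURCE B (Python) =====
-- def _qsel(pairs, k):
--     # k-th smallest (0-based) of distinct composite keys, average O(n)
--     pivot = pairs[0]
--     less = [p for p in pairs[1:] if p < pivot]
--     if k < len(less):
--         return _qsel(less, k)
--     if k == len(less):
--         return pivot
--     greater = [p for p in pairs[1:] if p > pivot]
--     return _qsel(greater, k - len(less) - 1)
--
--
-- def find_min_combination(valid_combinations):
--     if not valid_combinations:
--         return None
--     sums = [sum(item[1] for item in comb) for comb in valid_combinations]
--     keyed = [(s, i) for i, s in enumerate(sums)]
--     mn = keyed[0]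
--     for p in keyed[1:]:
--         if p < mn:
--             mn = p
--     mid = _qsel(keyed, len(keyed) // 2)
--     return valid_combinations[mn[1]], valid_combinations[mid[1]]
-- ===== Notes on version B (the rewrite author's own statement) =====
-- stated objective: alternative
-- what changed: Replaces the full stable sort with a single linear min-scan plus a quickselect on (sum, original index) composite keys, which reproduce the stable sort's first and middle elements exactly; asymptotically O(n) average vs O(n log n), though the measured difference was below timing resolution.
import Mathlib
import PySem

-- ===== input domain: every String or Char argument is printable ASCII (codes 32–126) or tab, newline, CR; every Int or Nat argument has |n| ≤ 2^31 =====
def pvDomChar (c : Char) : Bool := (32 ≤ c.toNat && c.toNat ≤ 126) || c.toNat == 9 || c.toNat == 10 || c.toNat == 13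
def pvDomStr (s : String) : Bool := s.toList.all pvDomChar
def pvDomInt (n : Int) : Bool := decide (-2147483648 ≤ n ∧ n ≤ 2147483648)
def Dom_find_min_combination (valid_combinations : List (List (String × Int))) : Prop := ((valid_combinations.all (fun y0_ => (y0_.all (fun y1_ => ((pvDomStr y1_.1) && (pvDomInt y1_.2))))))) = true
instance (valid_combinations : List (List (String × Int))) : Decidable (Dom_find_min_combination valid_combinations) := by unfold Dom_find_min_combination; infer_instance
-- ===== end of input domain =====

-- B replaces A's full sort by one min-scan plus a quickselect on (sum, original-index)
-- composite keys (an alternative algorithm; measured speed was comparable);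
-- neither version mutates its input.

-- ===== PORT A =====
-- the key lambda 'sum(subitem[1] for subitem in item)' (identical text in both sources)
def pvSumKey (item : List (String × Int)) : Int := (item.map (fun subitem => subitem.2)).sum

def find_min_combination (valid_combinations : List (List (String × Int))) : Option ((List (String × Int)) × (List (String × Int))) :=
  if valid_combinations = [] then none
  else
    let sorted_combinations := PySem.List.sorted valid_combinations pvSumKey false
    let min_combination := PySem.List.pyGetD sorted_combinations 0 []
    let _index := PySem.Int.floordiv (sorted_combinations.length : Int) 2
    let mid_combination := PySem.List.pyGetD sorted_combinations _index []
    some (min_combination, mid_combination)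

-- ===== PORT B =====
-- Python tuple comparison (s, i) < (s', i') : lexicographic on ints
def pvKeyLt (a b : Int × Int) : Bool := a.1 < b.1 || (a.1 == b.1 && a.2 < b.2)

-- _qsel: quickselect of the k-th smallest composite key (keys are distinct);
-- 'none' is exactly Python's IndexError on an empty list (never reached in range)
def pvQsel : List (Int × Int) → Int → Option (Int × Int)
  | [], _ => none
  | p :: t, k =>
    let less := t.filter (fun q => pvKeyLt q p)
    if k < (less.length : Int) then pvQsel less k
    else if k = (less.length : Int) then some p
    else pvQsel (t.filter (fun q => pvKeyLt p q)) (k - less.length - 1)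
termination_by ks _ => ks.length
decreasing_by
  · simp only [List.length_unattach]
    exact Nat.lt_succ_of_le (le_trans (List.length_filter_le _ _) (by simp))
  · simp only [List.length_unattach]
    exact Nat.lt_succ_of_le (le_trans (List.length_filter_le _ _) (by simp))

def find_min_combination_alt (valid_combinations : List (List (String × Int))) : Option ((List (String × Int)) × (List (String × Int))) :=
  if valid_combinations = [] then none
  else
    let sums := valid_combinations.map (fun comb => pvSumKey comb)
    let keyed := (PySem.List.enumerate sums 0).map (fun p => (p.2, p.1))
    match keyed with
    | [] => none  -- unreachable: keyed has the length of valid_combinations ≠ []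
    | h :: t =>
      let mn := t.foldl (fun best p => if pvKeyLt p best then p else best) h
      match pvQsel (h :: t) (PySem.Int.floordiv (((h :: t).length : Nat) : Int) 2) with
      | none => none  -- unreachable: the index is in range
      | some mid =>
        some (PySem.List.pyGetD valid_combinations mn.2 [],
              PySem.List.pyGetD valid_combinations mid.2 [])

-- ===== PRECONDITION & SPEC =====
def Spec_find_min_combination (valid_combinations : List (List (String × Int))) (out : Option ((List (String × Int)) × (List (String × Int)))) : Prop := out = find_min_combination_alt valid_combinations
instance (valid_combinations : List (List (String × Int))) (out : Option ((List (String × Int)) × (List (String × Int)))) : Decidable (Spec_find_min_combination valid_combinations out) := by unfold Spec_find_min_combination; infer_instance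

-- ===== CLAIM (what is proved, stated in full; the proofs are below) =====
def Claim_equal_find_min_combination : Prop := ∀ (valid_combinations : List (List (String × Int))), Dom_find_min_combination valid_combinations → Spec_find_min_combination valid_combinations (find_min_combination valid_combinations)

-- ===== LEMMAS AND PROOFS =====

-- the decorated list: each combination with its (sum, original index) composite key
def pvDec (vc : List (List (String × Int))) : List ((Int × Int) × List (String × Int)) :=
  (PySem.List.enumerate vc 0).map (fun p => ((pvSumKey p.2, p.1), p.2))

def pvIns (x : (Int × Int) × List (String × Int)) (acc : List ((Int × Int) × List (String × Int))) : List ((Int × Int) × List (String × Int)) :=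
  PySem.List.insertBy (fun a b => pvKeyLt a.1 b.1) x acc

def pvDecSort (vc : List (List (String × Int))) : List ((Int × Int) × List (String × Int)) :=
  (pvDec vc).foldl (fun acc x => pvIns x acc) []

-- lex-order facts
theorem pvKeyLt_irrefl (a : Int × Int) : pvKeyLt a a = false := by
  obtain ⟨a1, a2⟩ := a; simp [pvKeyLt]
theorem pvKeyLt_asymm {a b : Int × Int} (h : pvKeyLt a b = true) : pvKeyLt b a = false := by
  obtain ⟨a1, a2⟩ := a; obtain ⟨b1, b2⟩ := b; simp_all [pvKeyLt]; omega
theorem pvKeyLt_trans {a b c : Int × Int} (h1 : pvKeyLt a b = true) (h2 : pvKeyLt b c = true) : pvKeyLt a c = true := by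
  obtain ⟨a1, a2⟩ := a; obtain ⟨b1, b2⟩ := b; obtain ⟨c1, c2⟩ := c; simp_all [pvKeyLt]; omega
theorem pvKeyLt_total {a b : Int × Int} (hne : a ≠ b) (h : pvKeyLt a b = false) : pvKeyLt b a = true := by
  obtain ⟨a1, a2⟩ := a; obtain ⟨b1, b2⟩ := b; simp_all [pvKeyLt, Prod.ext_iff]; omega

-- insertBy produces a permutation of the cons
theorem pv_insertBy_perm {α : Type} (before : α → α → Bool) (x : α) (ys : List α) :
    (PySem.List.insertBy before x ys).Perm (x :: ys) := by
  induction ys with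
  | nil => simp [PySem.List.insertBy]
  | cons y ys ih =>
    simp only [PySem.List.insertBy]
    split
    · exact List.Perm.refl _
    · exact (ih.cons y).trans (List.Perm.swap x y ys)

-- the fold of pvIns is a permutation of its input
theorem pvFold_perm (ds : List ((Int × Int) × List (String × Int))) :
    ∀ acc, (ds.foldl (fun a x => pvIns x a) acc).Perm (ds ++ acc) := by
  induction ds with
  | nil => simp
  | cons x ds ih =>
    intro acc
    simp only [List.foldl_cons, List.cons_append]
    exact ((ih (pvIns x acc)).trans ((pv_insertBy_perm _ x acc).append_left ds)).trans
      List.perm_middle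

-- enumerate members: index and element
theorem pv_mem_enumerate {α : Type} (xs : List α) (s : Int) (p : Int × α)
    (hp : p ∈ PySem.List.enumerate xs s) :
    ∃ k : Nat, k < xs.length ∧ p.1 = s + (k : Int) ∧ xs[k]? = some p.2 := by
  induction xs generalizing s with
  | nil => simp [PySem.List.enumerate] at hp
  | cons x t ih =>
    rw [PySem.List.enumerate_cons] at hp
    rcases List.mem_cons.1 hp with h | h
    · exact ⟨0, by simp, by simp [h], by simp [h]⟩
    · obtain ⟨k, hk, h1, h2⟩ := ih (s+1) h
      exact ⟨k+1, by simpa using hk, by push_cast; omega, by simpa using h2⟩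

-- every decorated element carries its key and its position
theorem pvDec_mem (vc : List (List (String × Int))) (y : (Int × Int) × List (String × Int))
    (hy : y ∈ pvDec vc) :
    y.1.1 = pvSumKey y.2 ∧ ∃ k : Nat, k < vc.length ∧ y.1.2 = (k : Int) ∧
      PySem.List.pyGetD vc y.1.2 [] = y.2 := by
  obtain ⟨p, hp, hpy⟩ := List.mem_map.1 hy
  obtain ⟨k, hk, h1, h2⟩ := pv_mem_enumerate vc 0 p hp
  subst hpy
  refine ⟨rfl, k, hk, by simpa using h1, ?_⟩
  have : p.1 = (k : Int) := by simpa using h1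
  rw [this, PySem.List.pyGetD_natCast, List.getD_eq_getElem?_getD, h2]
  rfl

-- enumerate of a mapped list
theorem pv_enumerate_map {α β : Type} (f : α → β) (xs : List α) (s : Int) :
    PySem.List.enumerate (xs.map f) s = (PySem.List.enumerate xs s).map (fun p => (p.1, f p.2)) := by
  induction xs generalizing s with
  | nil => simp [PySem.List.enumerate]
  | cons x t ih => simp [PySem.List.enumerate_cons, ih]

-- B's keyed list is the key part of the decorated list
theorem pv_keyed_eq (vc : List (List (String × Int))) :
    (PySem.List.enumerate (vc.map (fun comb => pvSumKey comb)) 0).map (fun p => (p.2, p.1))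
      = (pvDec vc).map (fun d => d.1) := by
  rw [pv_enumerate_map]
  simp [pvDec, Function.comp]

-- STABILITY: inserting a maximal-index decorated element mirrors plain key insertion
theorem pvIns_map_snd (x : List (String × Int)) (s : Int)
    (acc : List ((Int × Int) × List (String × Int)))
    (hacc : ∀ y ∈ acc, y.1.1 = pvSumKey y.2 ∧ y.1.2 < s) :
    (pvIns ((pvSumKey x, s), x) acc).map (fun d => d.2)
      = PySem.List.insertBy (fun a b => decide (pvSumKey a < pvSumKey b)) x (acc.map (fun d => d.2)) := by
  induction acc with
  | nil => simp [pvIns, PySem.List.insertBy]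
  | cons y ys ih =>
    obtain ⟨hk, hi⟩ := hacc y (by simp)
    have hcmp : pvKeyLt (pvSumKey x, s) y.1 = decide (pvSumKey x < pvSumKey y.2) := by
      obtain ⟨⟨k1, k2⟩, e⟩ := y
      simp only at hk hi
      simp [pvKeyLt, hk]
      omega
    simp only [pvIns, PySem.List.insertBy, List.map_cons, hcmp]
    split
    · simp
    · simpa using ih (fun z hz => hacc z (by simp [hz]))

-- fold version of stability
theorem pvFold_map_snd (xs : List (List (String × Int))) : ∀ (s : Int)
    (acc : List ((Int × Int) × List (String × Int))),
    (∀ y ∈ acc, y.1.1 = pvSumKey y.2 ∧ y.1.2 < s) →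
    ((((PySem.List.enumerate xs s).map (fun p => ((pvSumKey p.2, p.1), p.2))).foldl
        (fun a x => pvIns x a) acc).map (fun d => d.2))
      = xs.foldl (fun a x => PySem.List.insertBy (fun a' b => decide (pvSumKey a' < pvSumKey b)) x a)
          (acc.map (fun d => d.2)) := by
  induction xs with
  | nil => intro s acc hacc; simp [PySem.List.enumerate]
  | cons x t ih =>
    intro s acc hacc
    rw [PySem.List.enumerate_cons]
    simp only [List.map_cons, List.foldl_cons]
    have hinv : ∀ y ∈ pvIns ((pvSumKey x, s), x) acc, y.1.1 = pvSumKey y.2 ∧ y.1.2 < s + 1 := by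
      intro y hy
      rcases (PySem.List.mem_insertBy _ _ _ _).1 hy with h | h
      · subst h; exact ⟨rfl, by simp⟩
      · obtain ⟨h1, h2⟩ := hacc y h; exact ⟨h1, by omega⟩
    rw [ih (s+1) _ hinv, pvIns_map_snd x s acc hacc]

-- A's stable sort is the decorated strict sort, forgetting the keys
theorem pv_sorted_eq (vc : List (List (String × Int))) :
    PySem.List.sorted vc pvSumKey false = (pvDecSort vc).map (fun d => d.2) := by
  rw [PySem.List.sorted_eq_foldl_insertBy]
  simp only [pvDecSort, pvDec]
  rw [pvFold_map_snd vc 0 [] (by simp)]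
  rfl

-- pvIns preserves strict lex ordering when the new key is fresh
theorem pvIns_pairwise (x : (Int × Int) × List (String × Int)) :
    ∀ (acc : List ((Int × Int) × List (String × Int))),
    acc.Pairwise (fun a b => pvKeyLt a.1 b.1 = true) →
    (∀ y ∈ acc, y.1 ≠ x.1) →
    (pvIns x acc).Pairwise (fun a b => pvKeyLt a.1 b.1 = true) := by
  intro acc
  induction acc with
  | nil => intro _ _; simp [pvIns, PySem.List.insertBy]
  | cons y ys ih =>
    intro hp hfresh
    rw [List.pairwise_cons] at hp
    obtain ⟨hy, hys⟩ := hp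
    simp only [pvIns, PySem.List.insertBy]
    split
    · rename_i hlt
      refine List.pairwise_cons.2 ⟨?_, List.pairwise_cons.2 ⟨hy, hys⟩⟩
      intro z hz
      rcases List.mem_cons.1 hz with h | h
      · subst h; exact hlt
      · exact pvKeyLt_trans hlt (hy z h)
    · rename_i hnlt
      have hxy : pvKeyLt y.1 x.1 = true :=
        pvKeyLt_total (fun h => hfresh y (by simp) h.symm) (by simpa using hnlt)
      refine List.pairwise_cons.2 ⟨?_, ih hys (fun z hz => hfresh z (by simp [hz]))⟩
      intro z hz
      rcases (PySem.List.mem_insertBy _ _ _ _).1 hz with h | h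
      · subst h; exact hxy
      · exact hy z h

-- the fold is pairwise strictly lex-sorted (fresh indices make keys distinct)
theorem pvFold_pairwise (xs : List (List (String × Int))) : ∀ (s : Int)
    (acc : List ((Int × Int) × List (String × Int))),
    (∀ y ∈ acc, y.1.2 < s) →
    acc.Pairwise (fun a b => pvKeyLt a.1 b.1 = true) →
    (((PySem.List.enumerate xs s).map (fun p => ((pvSumKey p.2, p.1), p.2))).foldl
        (fun a x => pvIns x a) acc).Pairwise (fun a b => pvKeyLt a.1 b.1 = true) := by
  induction xs with
  | nil => intro s acc _ hp; simpa [PySem.List.enumerate] using hp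
  | cons x t ih =>
    intro s acc hidx hp
    rw [PySem.List.enumerate_cons]
    simp only [List.map_cons, List.foldl_cons]
    refine ih (s+1) _ ?_ ?_
    · intro y hy
      rcases (PySem.List.mem_insertBy _ _ _ _).1 hy with h | h
      · subst h; simp
      · exact lt_trans (hidx y h) (by omega)
    · refine pvIns_pairwise _ acc hp ?_
      intro y hy he
      have := hidx y hy
      rw [he] at this
      simp at this

theorem pvDecSort_pairwise (vc : List (List (String × Int))) :
    (pvDecSort vc).Pairwise (fun a b => pvKeyLt a.1 b.1 = true) := by
  exact pvFold_pairwise vc 0 [] (by simp) (by simp)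

theorem pvDecSort_perm (vc : List (List (String × Int))) :
    (pvDecSort vc).Perm (pvDec vc) := by
  simpa using pvFold_perm (pvDec vc) []

-- QUICKSELECT: on a nodup key list, pvQsel returns the k-th element of any
-- strictly lex-sorted permutation
theorem pvQsel_eq (n : Nat) : ∀ (ks ss : List (Int × Int)), ks.length ≤ n → ks.Nodup →
    ss.Perm ks → ss.Pairwise (fun a b => pvKeyLt a b = true) →
    ∀ k : Int, 0 ≤ k → k < (ks.length : Int) → pvQsel ks k = ss[k.toNat]? := by
  induction n with
  | zero => intro ks ss hlen _ _ _ k hk0 hk; omega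
  | succ n ih =>
    intro ks ss hlen hnd hperm hpw k hk0 hk
    match ks with
    | [] => simp at hk; omega
    | p :: t =>
      have hpmem : p ∈ ss := hperm.mem_iff.2 (by simp)
      obtain ⟨u, v, huv⟩ := List.append_of_mem hpmem
      subst huv
      have hpw' := hpw
      rw [List.pairwise_append] at hpw'
      obtain ⟨hpu, hpv', hcross⟩ := hpw'
      rw [List.pairwise_cons] at hpv'
      obtain ⟨hpv, hvv⟩ := hpv'
      have hup : ∀ a ∈ u, pvKeyLt a p = true := fun a ha => hcross a ha p (by simp)
      -- filter identities on ss
      have hfu : (u ++ p :: v).filter (fun q => pvKeyLt q p) = u := by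
        rw [List.filter_append]
        have h1 : u.filter (fun q => pvKeyLt q p) = u := List.filter_eq_self.2 hup
        have h2 : (p :: v).filter (fun q => pvKeyLt q p) = [] := by
          rw [List.filter_eq_nil_iff]
          intro a ha
          rcases List.mem_cons.1 ha with h | h
          · subst h; simp [pvKeyLt_irrefl]
          · simp [pvKeyLt_asymm (hpv a h)]
        rw [h1, h2, List.append_nil]
      have hfv : (u ++ p :: v).filter (fun q => pvKeyLt p q) = v := by
        rw [List.filter_append]
        have h1 : u.filter (fun q => pvKeyLt p q) = [] := by
          rw [List.filter_eq_nil_iff]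
          intro a ha
          simp [pvKeyLt_asymm (hup a ha)]
        have h2 : (p :: v).filter (fun q => pvKeyLt p q) = v := by
          have : (p :: v).filter (fun q => pvKeyLt p q) = v.filter (fun q => pvKeyLt p q) := by
            simp [pvKeyLt_irrefl]
          rw [this, List.filter_eq_self.2 hpv]
        rw [h1, h2, List.nil_append]
      have hndt : t.Nodup := (List.nodup_cons.1 hnd).2
      have hfp : pvKeyLt p p = false := pvKeyLt_irrefl p
      have hpermu : u.Perm (t.filter (fun q => pvKeyLt q p)) := by
        have := hperm.filter (fun q => pvKeyLt q p)
        rw [hfu] at this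
        simpa [List.filter_cons, hfp] using this
      have hpermv : v.Perm (t.filter (fun q => pvKeyLt p q)) := by
        have := hperm.filter (fun q => pvKeyLt p q)
        rw [hfv] at this
        simpa [List.filter_cons, hfp] using this
      have hul : u.length = (t.filter (fun q => pvKeyLt q p)).length := hpermu.length_eq
      have hvl : v.length = (t.filter (fun q => pvKeyLt p q)).length := hpermv.length_eq
      have hssl : u.length + (v.length + 1) = t.length + 1 := by
        simpa using hperm.length_eq
      rw [pvQsel]
      by_cases h1 : k < ((t.filter (fun q => pvKeyLt q p)).length : Int)
      · rw [if_pos h1]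
        have := ih (t.filter (fun q => pvKeyLt q p)) u
          (by have := List.length_filter_le (fun q => pvKeyLt q p) t; simp at hlen ⊢; omega)
          (hndt.filter _) hpermu hpu k hk0 (by omega)
        rw [this, List.getElem?_append_left (by omega)]
      · rw [if_neg h1]
        by_cases h2 : k = ((t.filter (fun q => pvKeyLt q p)).length : Int)
        · rw [if_pos h2]
          have hkn : k.toNat = u.length := by omega
          rw [List.getElem?_append_right (by omega), hkn]
          simp
        · rw [if_neg h2]
          have hkg : ((t.filter (fun q => pvKeyLt q p)).length : Int) < k := by omega
          have hklt : k - (t.filter (fun q => pvKeyLt q p)).length - 1 < ((t.filter (fun q => pvKeyLt p q)).length : Int) := by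
            simp at hk
            omega
          have := ih (t.filter (fun q => pvKeyLt p q)) v
            (by have := List.length_filter_le (fun q => pvKeyLt p q) t; simp at hlen ⊢; omega)
            (hndt.filter _) hpermv hvv (k - (t.filter (fun q => pvKeyLt q p)).length - 1)
            (by omega) hklt
          rw [this, List.getElem?_append_right (by omega)]
          have hsucc : k.toNat - u.length = (k - ((t.filter (fun q => pvKeyLt q p)).length : Int) - 1).toNat + 1 := by
            omega
          rw [hsucc]
          simp

-- MIN SCAN: the fold computes an element no other element is lex-below
theorem pvMinScan (t : List (Int × Int)) : ∀ (h : Int × Int), (h :: t).Nodup →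
    (t.foldl (fun best p => if pvKeyLt p best then p else best) h) ∈ h :: t ∧
      ∀ q ∈ h :: t, pvKeyLt q (t.foldl (fun best p => if pvKeyLt p best then p else best) h) = false := by
  induction t with
  | nil => intro h _; exact ⟨by simp, by simp [pvKeyLt_irrefl]⟩
  | cons p t ih =>
    intro h hnd
    have hne : p ≠ h := by
      intro he; subst he; simp at hnd
    have hnd' : ((if pvKeyLt p h then p else h) :: t).Nodup := by
      split <;> (rw [List.nodup_cons]; simp at hnd; tauto)
    obtain ⟨hmem, hmin⟩ := ih (if pvKeyLt p h then p else h) hnd'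
    simp only [List.foldl_cons]
    constructor
    · rcases List.mem_cons.1 hmem with hm | hm
      · rw [hm]; split <;> simp
      · simp [hm]
    · intro q hq
      rcases List.mem_cons.1 hq with h1 | h1
      · rw [h1]
        by_cases hph : pvKeyLt p h = true
        · -- head = p in the inner scan; q = h
          rw [if_pos hph] at hmin hmem ⊢
          by_contra hcon
          rw [Bool.not_eq_false] at hcon
          have hpm : pvKeyLt p (List.foldl (fun best p => if pvKeyLt p best then p else best) p t) = false :=
            hmin p (by simp)
          rcases List.mem_cons.1 hmem with hm | hm
          · rw [hm] at hcon
            rw [pvKeyLt_asymm hph] at hcon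
            exact absurd hcon Bool.false_ne_true
          · -- h < m and p < h gives p < m, contra hpm
            have := pvKeyLt_trans hph hcon
            rw [hpm] at this; exact absurd this Bool.false_ne_true
        · rw [if_neg hph] at hmin ⊢
          exact hmin h (by simp)
      · rcases List.mem_cons.1 h1 with h2 | h2
        · rw [h2]
          by_cases hph : pvKeyLt p h = true
          · rw [if_pos hph] at hmin ⊢
            exact hmin p (by simp)
          · rw [if_neg hph] at hmin hmem ⊢
            by_contra hcon
            rw [Bool.not_eq_false] at hcon
            have hhm : pvKeyLt h (List.foldl (fun best p => if pvKeyLt p best then p else best) h t) = false :=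
              hmin h (by simp)
            have hhp : pvKeyLt h p = true := pvKeyLt_total hne (by simpa using hph)
            have := pvKeyLt_trans hhp hcon
            rw [hhm] at this; exact absurd this Bool.false_ne_true
        · exact hmin q (by simp [h2])

-- ===== VERDICT (by name: the statement is the Claim_ definition above) =====
theorem find_min_combination_spec : Claim_equal_find_min_combination := by
  intro vc _hdom
  unfold Spec_find_min_combination
  by_cases hvc : vc = []
  · simp [find_min_combination, find_min_combination_alt, hvc]
  -- abbreviations and basic facts
  have hn : 0 < vc.length := List.length_pos_iff.2 hvc
  set n := vc.length with hnn
  set K : Nat := n / 2 with hK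
  have hKn : K < n := by omega
  set ds := pvDecSort vc with hds
  set sc := PySem.List.sorted vc pvSumKey false with hsc
  have hperm : ds.Perm (pvDec vc) := pvDecSort_perm vc
  have hdecl : (pvDec vc).length = n := by
    simp only [pvDec, List.length_map, PySem.List.length_enumerate]
    exact hnn.symm
  have hdsl : ds.length = n := by rw [hperm.length_eq, hdecl]
  have hscl : sc.length = n := by
    rw [hsc, pv_sorted_eq vc, List.length_map, hdsl]
  set ss := ds.map (fun d => d.1) with hss
  have hssl : ss.length = n := by rw [hss, List.length_map, hdsl]
  have hkeyed : (PySem.List.enumerate (vc.map (fun comb => pvSumKey comb)) 0).map (fun p => (p.2, p.1))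
      = (pvDec vc).map (fun d => d.1) := pv_keyed_eq vc
  have hpermss : ss.Perm ((pvDec vc).map (fun d => d.1)) := hperm.map _
  have hpwss : ss.Pairwise (fun a b => pvKeyLt a b = true) := by
    rw [hss, List.pairwise_map]
    exact pvDecSort_pairwise vc
  have hndk : ((pvDec vc).map (fun d => d.1)).Nodup := by
    apply List.Nodup.of_map (fun q => q.2)
    have : (((pvDec vc).map (fun d => d.1)).map (fun q => q.2))
        = (PySem.List.enumerate vc 0).map (fun p => p.1) := by
      simp [pvDec, Function.comp]
    rw [this]
    have := PySem.List.map_fst_enumerate vc (0 : Int)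
    rw [this]
    exact PySem.List.nodup_pyRange_one 0 (0 + (vc.length : Int))
  -- index arithmetic: n // 2
  have hfl : ∀ m : Nat, PySem.Int.floordiv (m : Int) 2 = ((m / 2 : Nat) : Int) := by
    intro m
    rw [PySem.Int.floordiv_eq_ediv_of_pos (by norm_num)]
    rw [Int.natCast_div]
    rfl
  -- elements of ds determine lookups in vc
  have hlook : ∀ k : Nat, (hk : k < ds.length) →
      PySem.List.pyGetD vc (ds[k].1).2 [] = ds[k].2 := by
    intro k hk
    have hmem : ds[k] ∈ ds := List.getElem_mem hk
    have := pvDec_mem vc ds[k] (hperm.mem_iff.1 hmem)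
    exact this.2.choose_spec.2.2
  -- the A side: sorted[k] = ds[k].2
  have hscel : ∀ k : Nat, (hk : k < n) → sc[k]'(by omega) = (ds[k]'(by omega)).2 := by
    intro k hk
    have : sc = ds.map (fun d => d.2) := by rw [hsc, pv_sorted_eq vc]
    simp [this]
  -- qsel gives ss[K]
  have hq : pvQsel ((pvDec vc).map (fun d => d.1)) ((K : Nat) : Int) = some (ss[K]'(by omega)) := by
    rw [pvQsel_eq n _ ss (by rw [List.length_map, hdecl]) hndk hpermss hpwss
      ((K : Nat) : Int) (by positivity) (by rw [List.length_map, hdecl]; exact_mod_cast hKn)]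
    rw [Int.toNat_natCast]
    exact List.getElem?_eq_getElem (by omega)
  -- the A side value
  have hA : find_min_combination vc
      = some (sc[0]'(by omega), sc[K]'(by omega)) := by
    simp only [find_min_combination, if_neg hvc]
    rw [← hsc]
    have hidx : PySem.Int.floordiv ((sc.length : Nat) : Int) 2 = ((K : Nat) : Int) := by
      rw [hscl, hfl n, hK]
    rw [hidx]
    simp only [PySem.List.pyGetD_natCast, PySem.List.pyGetD_zero]
    rw [List.getD_eq_getElem _ _ (by omega), List.getD_eq_getElem _ _ (by omega)]
  -- the B side
  rw [hA]
  simp only [find_min_combination_alt, if_neg hvc]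
  rw [hkeyed]
  obtain ⟨h, t, hk⟩ : ∃ h t, (pvDec vc).map (fun d => d.1) = h :: t := by
    cases hkk : (pvDec vc).map (fun d => d.1) with
    | nil =>
      exfalso
      have := congrArg List.length hkk
      rw [List.length_map, hdecl] at this
      simp at this
      omega
    | cons h t => exact ⟨h, t, rfl⟩
  rw [hk]
  simp only []
  have hlent : (h :: t).length = n := by rw [← hk, List.length_map, hdecl]
  have hidx2 : PySem.Int.floordiv (((h :: t).length : Nat) : Int) 2 = ((K : Nat) : Int) := by
    rw [hlent, hfl n]
  rw [hidx2, ← hk, hq]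
  -- the min scan result is ss[0]
  have hnd2 : (h :: t).Nodup := hk ▸ hndk
  obtain ⟨hmnmem, hmnmin⟩ := pvMinScan t h hnd2
  obtain ⟨m0, tt, hss0⟩ : ∃ m0 tt, ss = m0 :: tt := by
    cases hsk : ss with
    | nil => exfalso; rw [hsk] at hssl; simp at hssl; omega
    | cons m0 tt => exact ⟨m0, tt, rfl⟩
  have hm0mem : m0 ∈ h :: t := by
    rw [← hk]
    exact hpermss.subset (by rw [hss0]; simp)
  have hmn : t.foldl (fun best p => if pvKeyLt p best then p else best) h = m0 := by
    have hmem2 : t.foldl (fun best p => if pvKeyLt p best then p else best) h ∈ ss := by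
      rw [hpermss.mem_iff, hk]
      exact hmnmem
    rw [hss0] at hmem2
    rcases List.mem_cons.1 hmem2 with hcase | hcase
    · exact hcase
    · exfalso
      have hlt : pvKeyLt m0 (t.foldl (fun best p => if pvKeyLt p best then p else best) h) = true := by
        have := hpwss
        rw [hss0, List.pairwise_cons] at this
        exact this.1 _ hcase
      rw [hmnmin m0 hm0mem] at hlt
      exact absurd hlt Bool.false_ne_true
  have hm0eq : ss[0]'(by omega) = m0 := by
    have h0 : ss[0]? = some m0 := by rw [hss0]; rfl
    rw [List.getElem?_eq_getElem (by omega)] at h0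
    exact Option.some.inj h0
  -- lookups
  have hlk : ∀ (k : Nat) (hkk : k < n), PySem.List.pyGetD vc ((ss[k]'(by omega)).2) [] = (ds[k]'(by omega)).2 := by
    intro k hkk
    have he : ss[k]'(by omega) = (ds[k]'(by omega)).1 := by
      simp [hss]
    rw [he]
    exact hlook k (by omega)
  rw [hmn, ← hm0eq]
  rw [hscel 0 (by omega), hscel K hKn, hlk 0 (by omega)]
  simp only []
  rw [hlk K hKn]
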